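-- pv_equiv track=rewrite | github.com/asakohayase/kiro-devsync-ai | send_dev_activity_notification.py | categorize_changes
-- ===== SOURCE A (Python) =====
-- from typing import Dict, List, Any, Optional
--
-- def categorize_changes(files: List[str]) -> Dict[str, List[str]]:
--     """Categorize changed files by type."""
--     categories = {
--         'core': [],
--         'templates': [],
--         'tests': [],
--         'docs': [],
--         'config': [],
--         'scripts': [],
--         'examples': [],
--         'hooks': [],
--         'analytics': [],
--         'api': [],
--         'other': []
--     }
--
--     for file in files:
--         file_lower = file.lower()
--
--         if 'devsync_ai/core/' in file:
--             categories['core'].append(file)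
--         elif 'devsync_ai/templates/' in file:
--             categories['templates'].append(file)
--         elif 'devsync_ai/analytics/' in file:
--             categories['analytics'].append(file)
--         elif 'devsync_ai/api/' in file:
--             categories['api'].append(file)
--         elif 'tests/' in file:
--             categories['tests'].append(file)
--         elif 'docs/' in file:
--             categories['docs'].append(file)
--         elif 'config/' in file:
--             categories['config'].append(file)
--         elif 'scripts/' in file:
--             categories['scripts'].append(file)
--         elif 'examples/' in file:
--             categories['examples'].append(file)
--         elif '.kiro/hooks/' in file or 'hooks/' in file:
--             categories['hooks'].append(file)
--         else:
--             categories['other'].append(file)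
--
--     # Remove empty categories
--     return {k: v for k, v in categories.items() if v}
-- ===== SOURCE B (Python) =====
-- # B: table-driven one-pass categorizer (idiomatic): first-match rule list + canonical order build.
-- _RULES = [
--     ('devsync_ai/core/', 'core'),
--     ('devsync_ai/templates/', 'templates'),
--     ('devsync_ai/analytics/', 'analytics'),
--     ('devsync_ai/api/', 'api'),
--     ('tests/', 'tests'),
--     ('docs/', 'docs'),
--     ('config/', 'config'),
--     ('scripts/', 'scripts'),
--     ('examples/', 'examples'),
--     ('hooks/', 'hooks'),
-- ]
--
-- _ORDER = ['core', 'templates', 'tests', 'docs', 'config', 'scripts',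
--           'examples', 'hooks', 'analytics', 'api', 'other']
--
--
-- def _category(file):
--     for sub, cat in _RULES:
--         if sub in file:
--             return cat
--     return 'other'
--
--
-- def categorize_changes(files):
--     """Categorize changed files by type."""
--     assigned = [(f, _category(f)) for f in files]
--     result = {}
--     for name in _ORDER:
--         vs = [f for f, c in assigned if c == name]
--         if vs:
--             result[name] = vs
--     return result
-- ===== Notes on version B (the rewrite author's own statement) =====
-- stated objective: idiomatic
-- what changed: Replaces the 11-way if/elif chain appending into a pre-declared dict by a data-driven design: an ordered (substring, category) rule table with a first-match lookup per file, then the output dict is built by iterating the canonical category order over the assigned pairs (the redundant '.kiro/hooks/' disjunct and the unused file_lower are dropped).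
import Mathlib
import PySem

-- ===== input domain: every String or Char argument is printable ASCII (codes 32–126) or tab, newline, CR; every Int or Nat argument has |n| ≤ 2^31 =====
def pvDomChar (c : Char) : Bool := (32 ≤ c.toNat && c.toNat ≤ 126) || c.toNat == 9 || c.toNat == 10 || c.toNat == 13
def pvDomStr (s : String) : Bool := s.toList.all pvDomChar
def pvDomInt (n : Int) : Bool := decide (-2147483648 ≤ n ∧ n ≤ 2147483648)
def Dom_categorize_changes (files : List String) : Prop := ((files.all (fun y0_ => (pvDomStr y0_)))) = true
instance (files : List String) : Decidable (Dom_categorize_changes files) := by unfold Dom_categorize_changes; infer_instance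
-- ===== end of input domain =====

-- B replaces A's 11-way if/elif chain by a first-match rule table and builds the output
-- by iterating the canonical category order (idiomatic; same cost). Return-value equivalence only.

-- ===== PORT A =====
-- the dict of 11 statically-known keys becomes a record of 11 lists
structure CatsA where
  core : List String
  templates : List String
  tests : List String
  docs : List String
  config : List String
  scripts : List String
  examples : List String
  hooks : List String
  analytics : List String
  api : List String
  other : List String
deriving Repr, DecidableEq

def stepA (c : CatsA) (file : String) : CatsA :=
  -- file_lower is computed and unused in A; omitted
  if PySem.Str.isIn "devsync_ai/core/" file then { c with core := c.core ++ [file] }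
  else if PySem.Str.isIn "devsync_ai/templates/" file then { c with templates := c.templates ++ [file] }
  else if PySem.Str.isIn "devsync_ai/analytics/" file then { c with analytics := c.analytics ++ [file] }
  else if PySem.Str.isIn "devsync_ai/api/" file then { c with api := c.api ++ [file] }
  else if PySem.Str.isIn "tests/" file then { c with tests := c.tests ++ [file] }
  else if PySem.Str.isIn "docs/" file then { c with docs := c.docs ++ [file] }
  else if PySem.Str.isIn "config/" file then { c with config := c.config ++ [file] }
  else if PySem.Str.isIn "scripts/" file then { c with scripts := c.scripts ++ [file] }
  else if PySem.Str.isIn "examples/" file then { c with examples := c.examples ++ [file] }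
  else if PySem.Str.isIn ".kiro/hooks/" file || PySem.Str.isIn "hooks/" file then { c with hooks := c.hooks ++ [file] }
  else { c with other := c.other ++ [file] }

def categorize_changes (files : List String) : List (String × List String) :=
  let c := files.foldl stepA ⟨[], [], [], [], [], [], [], [], [], [], []⟩
  -- {k: v for k, v in categories.items() if v}
  ([("core", c.core), ("templates", c.templates), ("tests", c.tests), ("docs", c.docs),
    ("config", c.config), ("scripts", c.scripts), ("examples", c.examples), ("hooks", c.hooks),
    ("analytics", c.analytics), ("api", c.api), ("other", c.other)]).filter (fun kv => !kv.2.isEmpty)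

-- ===== PORT B =====
def rulesB : List (String × String) :=
  [("devsync_ai/core/", "core"), ("devsync_ai/templates/", "templates"),
   ("devsync_ai/analytics/", "analytics"), ("devsync_ai/api/", "api"),
   ("tests/", "tests"), ("docs/", "docs"), ("config/", "config"),
   ("scripts/", "scripts"), ("examples/", "examples"), ("hooks/", "hooks")]

def orderB : List String :=
  ["core", "templates", "tests", "docs", "config", "scripts", "examples",
   "hooks", "analytics", "api", "other"]

-- first rule whose substring occurs in the file, else 'other'
def categoryB (file : String) : String :=
  match rulesB.find? (fun r => PySem.Str.isIn r.1 file) with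
  | some r => r.2
  | none => "other"

def categorize_changes_alt (files : List String) : List (String × List String) :=
  let assigned := files.map (fun f => (f, categoryB f))
  orderB.foldl (fun result name =>
    let vs := (assigned.filter (fun p => p.2 == name)).map (fun p => p.1)
    if !vs.isEmpty then result ++ [(name, vs)] else result) []

-- ===== PRECONDITION & SPEC =====
def Spec_categorize_changes (files : List String) (out : List (String × List String)) : Prop := out = categorize_changes_alt files
instance (files : List String) (out : List (String × List String)) : Decidable (Spec_categorize_changes files out) := by unfold Spec_categorize_changes; infer_instance

-- ===== CLAIM (what is proved, stated in full; the proofs are below) =====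
def Claim_equal_categorize_changes : Prop := ∀ (files : List String), Dom_categorize_changes files → Spec_categorize_changes files (categorize_changes files)

-- ===== LEMMAS AND PROOFS =====

-- proof helper: append f to the field named `name` (the "other" default mirrors categoryB's default)
def addCat (c : CatsA) (name : String) (f : String) : CatsA :=
  if name = "core" then { c with core := c.core ++ [f] }
  else if name = "templates" then { c with templates := c.templates ++ [f] }
  else if name = "analytics" then { c with analytics := c.analytics ++ [f] }
  else if name = "api" then { c with api := c.api ++ [f] }
  else if name = "tests" then { c with tests := c.tests ++ [f] }
  else if name = "docs" then { c with docs := c.docs ++ [f] }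
  else if name = "config" then { c with config := c.config ++ [f] }
  else if name = "scripts" then { c with scripts := c.scripts ++ [f] }
  else if name = "examples" then { c with examples := c.examples ++ [f] }
  else if name = "hooks" then { c with hooks := c.hooks ++ [f] }
  else { c with other := c.other ++ [f] }

-- '.kiro/hooks/' contains 'hooks/', so A's disjunct is subsumed
lemma kiro_hooks_sub (f : String) (h : PySem.Str.isIn ".kiro/hooks/" f = true) :
    PySem.Str.isIn "hooks/" f = true := by
  rw [PySem.Str.isIn_iff_infix] at h ⊢
  exact List.IsInfix.trans (by decide) h

lemma stepA_eq (c : CatsA) (f : String) : stepA c f = addCat c (categoryB f) f := by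
  by_cases h1 : PySem.Str.isIn "devsync_ai/core/" f = true
  · simp_all [stepA, categoryB, rulesB, addCat]
  by_cases h2 : PySem.Str.isIn "devsync_ai/templates/" f = true
  · simp_all [stepA, categoryB, rulesB, addCat]
  by_cases h3 : PySem.Str.isIn "devsync_ai/analytics/" f = true
  · simp_all [stepA, categoryB, rulesB, addCat]
  by_cases h4 : PySem.Str.isIn "devsync_ai/api/" f = true
  · simp_all [stepA, categoryB, rulesB, addCat]
  by_cases h5 : PySem.Str.isIn "tests/" f = true
  · simp_all [stepA, categoryB, rulesB, addCat]
  by_cases h6 : PySem.Str.isIn "docs/" f = true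
  · simp_all [stepA, categoryB, rulesB, addCat]
  by_cases h7 : PySem.Str.isIn "config/" f = true
  · simp_all [stepA, categoryB, rulesB, addCat]
  by_cases h8 : PySem.Str.isIn "scripts/" f = true
  · simp_all [stepA, categoryB, rulesB, addCat]
  by_cases h9 : PySem.Str.isIn "examples/" f = true
  · simp_all [stepA, categoryB, rulesB, addCat]
  by_cases h10 : PySem.Str.isIn "hooks/" f = true
  · simp_all [stepA, categoryB, rulesB, addCat]
  · have hk : PySem.Str.isIn ".kiro/hooks/" f = false := by
      cases hx : PySem.Str.isIn ".kiro/hooks/" f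
      · rfl
      · exact absurd (kiro_hooks_sub f hx) h10
    simp_all [stepA, categoryB, rulesB, addCat]

abbrev catFilter (files : List String) (n : String) : List String :=
  files.filter (fun f => categoryB f == n)

lemma foldA_eq (files : List String) (c : CatsA) :
    files.foldl stepA c =
      ⟨c.core ++ catFilter files "core", c.templates ++ catFilter files "templates",
       c.tests ++ catFilter files "tests", c.docs ++ catFilter files "docs",
       c.config ++ catFilter files "config", c.scripts ++ catFilter files "scripts",
       c.examples ++ catFilter files "examples", c.hooks ++ catFilter files "hooks",
       c.analytics ++ catFilter files "analytics", c.api ++ catFilter files "api",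
       c.other ++ catFilter files "other"⟩ := by
  induction files generalizing c with
  | nil => simp [catFilter]
  | cons f fs ih =>
    rw [List.foldl_cons, stepA_eq, ih]
    have hother : ∀ n : String, categoryB f ≠ n →
        catFilter (f :: fs) n = catFilter fs n := by
      intro n hn; simp [catFilter, hn]
    -- case on which category f lands in; categoryB f is one of the 11 names or "other"
    have hcat : categoryB f = "core" ∨ categoryB f = "templates" ∨ categoryB f = "analytics" ∨
        categoryB f = "api" ∨ categoryB f = "tests" ∨ categoryB f = "docs" ∨
        categoryB f = "config" ∨ categoryB f = "scripts" ∨ categoryB f = "examples" ∨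
        categoryB f = "hooks" ∨ categoryB f = "other" := by
      unfold categoryB rulesB
      cases hx : List.find? (fun r => PySem.Str.isIn r.1 f)
        [("devsync_ai/core/", "core"), ("devsync_ai/templates/", "templates"),
         ("devsync_ai/analytics/", "analytics"), ("devsync_ai/api/", "api"),
         ("tests/", "tests"), ("docs/", "docs"), ("config/", "config"),
         ("scripts/", "scripts"), ("examples/", "examples"), ("hooks/", "hooks")] with
      | none => simp
      | some r =>
        have := List.find?_some hx
        have hm := List.mem_of_find?_eq_some hx
        fin_cases hm <;> simp
    rcases hcat with h | h | h | h | h | h | h | h | h | h | h <;>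
      · rw [h]
        simp only [addCat, String.reduceEq, reduceIte]
        congr 1 <;>
          first
            | rw [hother _ (by rw [h]; decide)]
            | (simp [catFilter, h, List.append_assoc])

lemma assigned_filter (files : List String) (n : String) :
    ((files.map (fun f => (f, categoryB f))).filter (fun p => p.2 == n)).map (fun p => p.1)
      = catFilter files n := by
  induction files with
  | nil => rfl
  | cons f fs ih =>
    by_cases h : categoryB f = n <;> simp [catFilter, h, ih]

lemma buildB (names : List String) (V : String → List String) (acc : List (String × List String)) :
    names.foldl (fun result name =>
        let vs := V name
        if !vs.isEmpty then result ++ [(name, vs)] else result) acc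
      = acc ++ (names.map (fun n => (n, V n))).filter (fun kv => !kv.2.isEmpty) := by
  induction names generalizing acc with
  | nil => simp
  | cons n ns ih =>
    simp only [List.foldl_cons, List.map_cons, List.filter_cons]
    by_cases h : (V n).isEmpty = true
    · rw [if_neg (by simp [h]), ih, if_neg (by simp [h])]
    · rw [if_pos (by simp [h]), ih, if_pos (by simp [h]), List.append_assoc,
        List.singleton_append]

-- ===== VERDICT (by name: the statement is the Claim_ definition above) =====
theorem categorize_changes_spec : Claim_equal_categorize_changes := by
  intro files _
  unfold Spec_categorize_changes categorize_changes categorize_changes_alt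
  simp only [assigned_filter]
  rw [buildB orderB (catFilter files) [], foldA_eq]
  simp [orderB]
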